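-- pv_equiv track=rewrite | github.com/caruarte/Guia3 | guia7.py | vocales
-- ===== SOURCE A (Python) =====
-- def pertenece(e: str, s: list[str]) -> bool:
--     res:bool = False
--     for i in s:
--         if i == e:
--             res = True
--     return res
--
-- def vocales(s: str) -> bool:
--     res:bool = False
--     vocales:list[str] = []
--     for i in s:
--         if pertenece(i, ["a", "e", "i", "o", "u"]) and not pertenece(i, vocales):
--             vocales.append(i)
--     if len(vocales) >= 3:
--         res = True
--     return res
-- ===== SOURCE B (Python) =====
-- def vocales(s: str) -> bool:
--     count = 0
--     for v in "aeiou":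
--         if v in s:
--             count += 1
--     return count >= 3
-- ===== Notes on version B (the rewrite author's own statement) =====
-- stated objective: idiomatic
-- what changed: B iterates over the five fixed vowels and counts how many occur in s with one membership test each, instead of scanning every character of s and accumulating a dedup list of seen vowels via a quadratic-scan helper.
import Mathlib
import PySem

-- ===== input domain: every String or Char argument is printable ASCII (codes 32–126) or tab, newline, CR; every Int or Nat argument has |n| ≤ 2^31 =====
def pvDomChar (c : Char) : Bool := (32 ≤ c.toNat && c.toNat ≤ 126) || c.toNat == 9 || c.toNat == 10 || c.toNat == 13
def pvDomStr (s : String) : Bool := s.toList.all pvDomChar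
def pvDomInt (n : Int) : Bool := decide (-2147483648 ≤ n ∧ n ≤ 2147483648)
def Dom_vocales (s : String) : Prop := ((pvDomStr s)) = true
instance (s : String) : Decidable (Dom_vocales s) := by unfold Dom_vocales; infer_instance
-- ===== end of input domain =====

-- B iterates over the five fixed vowels counting which occur in s, instead of scanning s and deduping into a list (idiomatic; same cost).


-- ===== PORT A =====
def pertenece (e : Char) (s : List Char) : Bool :=
  s.foldl (fun res i => if i == e then true else res) false

def vocales (s : String) : Bool :=
  let voc := s.toList.foldl
    (fun voc i =>
      if pertenece i ['a','e','i','o','u'] && !(pertenece i voc) then voc ++ [i] else voc) []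
  if voc.length ≥ 3 then true else false

-- ===== PORT B =====
def vocales_alt (s : String) : Bool :=
  let count := "aeiou".toList.foldl
    (fun c v => if s.toList.contains v then c + 1 else c) (0 : Int)
  decide (count ≥ 3)

-- ===== PRECONDITION & SPEC =====
def Spec_vocales (s : String) (out : Bool) : Prop := out = vocales_alt s
instance (s : String) (out : Bool) : Decidable (Spec_vocales s out) := by unfold Spec_vocales; infer_instance

-- ===== CLAIM (what is proved, stated in full; the proofs are below) =====
def Claim_equal_vocales : Prop := ∀ (s : String), Dom_vocales s → Spec_vocales s (vocales s)

-- ===== LEMMAS AND PROOFS =====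

theorem pertenece_aux (e : Char) (l : List Char) (r : Bool) :
    l.foldl (fun res i => if i == e then true else res) r = (r || l.contains e) := by
  induction l generalizing r with
  | nil => simp
  | cons h t ih =>
    simp only [List.foldl, List.contains_cons, ih]
    by_cases hc : (h == e) = true <;> simp [hc, BEq.comm (a := e) (b := h)]

theorem pertenece_eq (e : Char) (l : List Char) : pertenece e l = l.contains e := by
  unfold pertenece
  rw [pertenece_aux]
  simp

-- general invariant of A's accumulating loop (V kept abstract so membership stays opaque)
theorem fold_mem_nodup (V : List Char) (l : List Char) : ∀ (acc : List Char), acc.Nodup →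
    (l.foldl (fun voc i =>
      if pertenece i V && !(pertenece i voc) then voc ++ [i] else voc) acc).Nodup ∧
    ∀ v, v ∈ l.foldl (fun voc i =>
      if pertenece i V && !(pertenece i voc) then voc ++ [i] else voc) acc ↔
      v ∈ acc ∨ (v ∈ V ∧ v ∈ l) := by
  induction l with
  | nil => intro acc h; simpa using h
  | cons hd t ih =>
    intro acc hacc
    simp only [List.foldl]
    by_cases hc : (pertenece hd V && !(pertenece hd acc)) = true
    · have hmem : hd ∈ V ∧ hd ∉ acc := by
        simpa [pertenece_eq] using hc
      rw [if_pos hc]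
      have hnd : (acc ++ [hd]).Nodup := by
        rw [List.nodup_append]
        exact ⟨hacc, List.nodup_singleton _,
          fun a ha b hb h => hmem.2 (by
            simp only [List.mem_cons, List.not_mem_nil, or_false] at hb
            subst hb
            exact h ▸ ha)⟩
      obtain ⟨n1, m1⟩ := ih (acc ++ [hd]) hnd
      refine ⟨n1, fun v => ?_⟩
      rw [m1 v]
      simp only [List.mem_append, List.mem_cons, List.not_mem_nil, or_false]
      constructor
      · rintro ((h | rfl) | ⟨hv, ht⟩)
        · exact Or.inl h
        · exact Or.inr ⟨hmem.1, Or.inl rfl⟩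
        · exact Or.inr ⟨hv, Or.inr ht⟩
      · rintro (h | ⟨hv, (rfl | ht)⟩)
        · exact Or.inl (Or.inl h)
        · exact Or.inl (Or.inr rfl)
        · exact Or.inr ⟨hv, ht⟩
    · have hnc : hd ∉ V ∨ hd ∈ acc := by
        by_contra hcon
        push_neg at hcon
        exact hc (by simp [pertenece_eq, hcon.1, hcon.2])
      rw [if_neg hc]
      obtain ⟨n1, m1⟩ := ih acc hacc
      refine ⟨n1, fun v => ?_⟩
      rw [m1 v]
      simp only [List.mem_cons]
      constructor
      · rintro (h | ⟨hv, ht⟩)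
        · exact Or.inl h
        · exact Or.inr ⟨hv, Or.inr ht⟩
      · rintro (h | ⟨hv, (rfl | ht)⟩)
        · exact Or.inl h
        · rcases hnc with h1 | h2
          · exact absurd hv h1
          · exact Or.inl h2
        · exact Or.inr ⟨hv, ht⟩

theorem count_aux (l : List Char) (vl : List Char) : ∀ (c : Int),
    vl.foldl (fun c v => if l.contains v then c + 1 else c) c
      = c + (vl.filter (fun v => l.contains v)).length := by
  induction vl with
  | nil => intro c; simp
  | cons h t ih =>
    intro c
    by_cases hc : l.contains h = true
    · rw [List.foldl_cons, if_pos hc, ih, List.filter_cons, if_pos hc]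
      push_cast [List.length_cons]
      omega
    · rw [List.foldl_cons, if_neg hc, ih, List.filter_cons, if_neg hc]

theorem vocales_len (s : String) :
    (s.toList.foldl (fun voc i =>
      if pertenece i ['a','e','i','o','u'] && !(pertenece i voc) then voc ++ [i] else voc) []).length
    = ((['a','e','i','o','u'] : List Char).filter (fun v => s.toList.contains v)).length := by
  obtain ⟨hnd, hmem⟩ := fold_mem_nodup ['a','e','i','o','u'] s.toList [] List.nodup_nil
  have hGnd : ((['a','e','i','o','u'] : List Char).filter (fun v => s.toList.contains v)).Nodup :=
    List.Nodup.filter _ (by decide)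
  refine List.Perm.length_eq ?_
  rw [List.perm_ext_iff_of_nodup hnd hGnd]
  intro v
  rw [hmem v]
  simp [List.mem_filter]

-- ===== VERDICT (by name: the statement is the Claim_ definition above) =====
theorem vocales_spec : Claim_equal_vocales := by
  intro s _
  unfold Spec_vocales vocales vocales_alt
  have hav : "aeiou".toList = (['a','e','i','o','u'] : List Char) := by decide
  dsimp only
  rw [hav, count_aux, vocales_len]
  simp
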